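-- pv_equiv track=rewrite | github.com/egwilborn/python-practice | python-daily-coding.py | contain_all_rots
-- ===== SOURCE A (Python) =====
-- def contain_all_rots(strng, arr):
--     rots_count = 0
--     # first determine all rots
--     # do this by definning an array
--     all_rots = []
--     # take the string and make the rotation then push the new rot in the array
--
--     def rotation(rot_strng):
--         str_list = [0]
--         for char in rot_strng:
--             str_list.append(char)
--         str_list[0] = str_list[(len(str_list)-1)]
--         new_str_list = str_list[0:(len(rot_strng))]
--         rot = "".join(new_str_list)
--         all_rots.append(rot)
--         if (rot == strng):
--             return
--         else:
--             rotation(rot)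
--     rotation(strng)
--     for str in all_rots:
--         if str in arr:
--             rots_count += 1
--     if rots_count == len(all_rots):
--         return True
--     else:
--         return False
-- ===== SOURCE B (Python) =====
-- def contain_all_rots(strng, arr):
--     if strng == "":
--         return strng in arr
--     n = len(strng)
--     return all(strng[i:] + strng[:i] in arr for i in range(n))
-- ===== Notes on version B (the rewrite author's own statement) =====
-- stated objective: simpler
-- what changed: Replaces A's recursive char-by-char rotation generator (with its count-then-compare membership tally) by a direct all() over index slices strng[i:]+strng[:i], special-casing the empty string; all() also short-circuits on the first missing rotation.
import Mathlib
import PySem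

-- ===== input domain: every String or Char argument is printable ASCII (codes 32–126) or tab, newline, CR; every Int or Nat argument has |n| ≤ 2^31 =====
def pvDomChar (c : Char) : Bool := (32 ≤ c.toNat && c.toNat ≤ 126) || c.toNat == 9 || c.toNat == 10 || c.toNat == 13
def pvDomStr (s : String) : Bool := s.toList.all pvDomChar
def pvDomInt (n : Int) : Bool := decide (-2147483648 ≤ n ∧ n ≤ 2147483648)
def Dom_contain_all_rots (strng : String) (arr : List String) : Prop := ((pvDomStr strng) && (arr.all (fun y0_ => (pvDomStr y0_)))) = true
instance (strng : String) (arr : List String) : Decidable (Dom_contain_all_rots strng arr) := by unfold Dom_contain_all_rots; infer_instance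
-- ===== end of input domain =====

-- B replaces A's recursive char-by-char rotation generator and count-then-compare tally by a
-- direct all() over index-sliced rotations (objective: simpler).


-- ===== PORT A =====
-- body of A's inner `rotation`: str_list = [0] + chars; str_list[0] = str_list[-1]; take len(rot_strng); "".join.
-- The placeholder 0 at index 0 is overwritten by the last element before use (for "" it overwrites it by itself
-- and the take 0 discards it, so its value never reaches the result; we use ' ' in its slot).
def pyRot (t : String) : String :=
  let chars := t.toList
  let strList := chars.getLastD ' ' :: chars
  String.ofList (strList.take chars.length)

-- A's recursion `rotation`, with the appends to `all_rots` made explicit in an accumulator.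
-- fuel = len(strng)+1 is never exhausted: the rotation returns to strng within len(strng) steps (proved below).
def rotLoop (strng : String) : Nat → String → List String → List String
  | 0, _, acc => acc
  | fuel+1, cur, acc =>
    let rot := pyRot cur
    let acc' := acc ++ [rot]
    if rot == strng then acc' else rotLoop strng fuel rot acc'

def contain_all_rots (strng : String) (arr : List String) : Bool :=
  let all_rots := rotLoop strng (strng.toList.length + 1) strng []
  let rots_count : Int := all_rots.foldl (fun c r => if arr.contains r then c + 1 else c) 0
  rots_count == (all_rots.length : Int)

-- ===== PORT B =====
def contain_all_rots_alt (strng : String) (arr : List String) : Bool :=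
  if strng == "" then arr.contains strng
  else (List.range strng.toList.length).all fun i =>
    arr.contains (String.ofList (strng.toList.drop i ++ strng.toList.take i))

-- ===== PRECONDITION & SPEC =====
def Spec_contain_all_rots (strng : String) (arr : List String) (out : Bool) : Prop := out = contain_all_rots_alt strng arr
instance (strng : String) (arr : List String) (out : Bool) : Decidable (Spec_contain_all_rots strng arr out) := by unfold Spec_contain_all_rots; infer_instance

-- ===== CLAIM (what is proved, stated in full; the proofs are below) =====
def Claim_equal_contain_all_rots : Prop := ∀ (strng : String) (arr : List String), Dom_contain_all_rots strng arr → Spec_contain_all_rots strng arr (contain_all_rots strng arr)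

-- ===== LEMMAS AND PROOFS =====

-- the list-level rotation step underlying pyRot
def rotF (l : List Char) : List Char := (l.getLastD ' ' :: l).take l.length

theorem pyRot_ofList (m : List Char) : pyRot (String.ofList m) = String.ofList (rotF m) := by
  simp [pyRot, rotF, String.toList_ofList]

theorem rotF_eq_rotate (l : List Char) (h : l ≠ []) :
    rotF l = l.rotate (l.length - 1) := by
  obtain ⟨a, as, rfl⟩ := List.exists_cons_of_ne_nil h
  rw [List.rotate_eq_drop_append_take (Nat.sub_le _ _), List.drop_length_sub_one h,
    List.getLast_eq_getLastD, ← List.getLastD_cons (a := ' ')]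
  simp [rotF, List.take_succ_cons]

theorem iterF_eq_rotate (l : List Char) (h : l ≠ []) :
    ∀ j, rotF^[j] l = l.rotate ((l.length - 1) * j) := by
  intro j
  induction j with
  | zero => simp
  | succ j ih =>
    have hne : l.rotate ((l.length - 1) * j) ≠ [] := by simp [List.rotate_eq_nil_iff, h]
    rw [Function.iterate_succ_apply', ih, rotF_eq_rotate _ hne, List.length_rotate,
      List.rotate_rotate]
    ring_nf

theorem iterF_self (l : List Char) (h : l ≠ []) : rotF^[l.length] l = l := by
  rw [iterF_eq_rotate l h, ← List.rotate_mod, Nat.mul_mod_left, List.rotate_zero]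

-- reduce an iterate index into [1, p] given a return time p
theorem iter_reduce (l : List Char) (p : Nat) (hp1 : 1 ≤ p) (hpl : rotF^[p] l = l) :
    ∀ j, 1 ≤ j → ∃ j', 1 ≤ j' ∧ j' ≤ p ∧ rotF^[j'] l = rotF^[j] l := by
  intro j
  induction j using Nat.strong_induction_on with
  | _ j ih =>
    intro hj
    by_cases hle : j ≤ p
    · exact ⟨j, hj, hle, rfl⟩
    · obtain ⟨j', h1', h2', h3'⟩ := ih (j - p) (by omega) (by omega)
      refine ⟨j', h1', h2', ?_⟩
      calc rotF^[j'] l = rotF^[j - p] l := h3'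
        _ = rotF^[j - p] (rotF^[p] l) := by rw [hpl]
        _ = rotF^[(j - p) + p] l := (Function.iterate_add_apply _ _ _ _).symm
        _ = rotF^[j] l := by rw [show (j - p) + p = j from by omega]

theorem mod_key (n i : Nat) (hn : 1 ≤ n) (hi : i < n) :
    ((n - 1) * (n - i)) % n = i := by
  have key : (n - 1) * (n - i) = i + (n - i - 1) * n := by
    zify [hn, Nat.le_of_lt hi, (by omega : 1 ≤ n - i)]
    ring
  rw [key, Nat.add_mul_mod_self_right, Nat.mod_eq_of_lt hi]

-- the run of A's loop, starting at iterate t, for p the first return time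
theorem rotLoop_spec (strng : String) (p : Nat)
    (hpl : rotF^[p] strng.toList = strng.toList)
    (hmin : ∀ j, 1 ≤ j → j < p → rotF^[j] strng.toList ≠ strng.toList) :
    ∀ fuel t acc, t < p → p - t ≤ fuel →
      rotLoop strng fuel (String.ofList (rotF^[t] strng.toList)) acc
        = acc ++ (List.range' (t+1) (p - t)).map (fun j => String.ofList (rotF^[j] strng.toList)) := by
  intro fuel
  induction fuel with
  | zero => intro t acc ht hf; omega
  | succ fuel ih =>
    intro t acc ht hf
    have hrot : pyRot (String.ofList (rotF^[t] strng.toList))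
        = String.ofList (rotF^[t+1] strng.toList) := by
      rw [pyRot_ofList]
      exact congrArg _ (Function.iterate_succ_apply' rotF t _).symm
    rw [rotLoop]
    simp only [hrot]
    by_cases hstop : t + 1 = p
    · have hs : String.ofList (rotF^[t+1] strng.toList) = strng := by
        rw [hstop, hpl, String.ofList_toList]
      rw [if_pos (by simp only [hs, beq_self_eq_true])]
      have hpt : p - t = 1 := by omega
      rw [hpt, List.range'_succ]
      simp
    · have hne : String.ofList (rotF^[t+1] strng.toList) ≠ strng := by
        intro hEq
        have h2 : rotF^[t+1] strng.toList = strng.toList := by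
          have := congrArg String.toList hEq
          simpa [String.toList_ofList] using this
        exact hmin (t+1) (by omega) (by omega) h2
      have hcond : ¬ ((String.ofList (rotF^[t+1] strng.toList) == strng) = true) := by
        simpa using hne
      rw [if_neg hcond]
      rw [ih (t+1) (acc ++ [String.ofList (rotF^[t+1] strng.toList)]) (by omega) (by omega)]
      rw [show p - t = (p - (t+1)) + 1 from by omega, List.range'_succ]
      simp

-- both programs test membership of the same set of rotations
theorem mem_rots_iff (l : List Char) (h : l ≠ []) (p : Nat)
    (hp1 : 1 ≤ p) (hpl : rotF^[p] l = l)
    (C : String → Prop) :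
    (∀ j, 1 ≤ j → j ≤ p → C (String.ofList (rotF^[j] l))) ↔
    (∀ i, i < l.length → C (String.ofList (l.rotate i))) := by
  have hn : 1 ≤ l.length := List.length_pos_iff.mpr h
  constructor
  · intro hall i hi
    obtain ⟨j', h1', h2', h3'⟩ := iter_reduce l p hp1 hpl (l.length - i) (by omega)
    have hrot : rotF^[l.length - i] l = l.rotate i := by
      rw [iterF_eq_rotate l h, ← List.rotate_mod, mod_key l.length i hn hi]
    have h2 := hall j' h1' h2'
    rw [h3', hrot] at h2
    exact h2
  · intro hall j hj1 hj2
    rw [iterF_eq_rotate l h, ← List.rotate_mod]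
    exact hall _ (Nat.mod_lt _ (by omega))

-- ===== VERDICT (by name: the statement is the Claim_ definition above) =====
theorem contain_all_rots_spec : Claim_equal_contain_all_rots := by
  intro strng arr _
  unfold Spec_contain_all_rots contain_all_rots contain_all_rots_alt
  by_cases hnil : strng.toList = []
  · have hs : strng = "" := String.toList_eq_nil_iff.mp hnil
    subst hs
    by_cases hc : "" ∈ arr
    · simp [rotLoop, pyRot, hc]
    · simp [rotLoop, pyRot, hc]
  · -- nonempty case
    have hn : 1 ≤ strng.toList.length := List.length_pos_iff.mpr hnil
    have hsne : ¬ (strng == "") = true := by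
      simp only [beq_iff_eq]
      intro hEq; exact hnil (by simp [hEq])
    have hex : ∃ j, 1 ≤ j ∧ rotF^[j] strng.toList = strng.toList :=
      ⟨strng.toList.length, hn, iterF_self _ hnil⟩
    have hpspec : 1 ≤ Nat.find hex ∧ rotF^[Nat.find hex] strng.toList = strng.toList :=
      Nat.find_spec hex
    have hmin : ∀ j, 1 ≤ j → j < Nat.find hex → rotF^[j] strng.toList ≠ strng.toList := by
      intro j hj1 hjp hEq
      exact Nat.find_min hex hjp ⟨hj1, hEq⟩
    have hple : Nat.find hex ≤ strng.toList.length := Nat.find_le ⟨hn, iterF_self _ hnil⟩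
    have hrun := rotLoop_spec strng (Nat.find hex) hpspec.2 hmin
      (strng.toList.length + 1) 0 [] (by omega) (by omega)
    rw [Function.iterate_zero_apply, String.ofList_toList] at hrun
    rw [hrun, if_neg hsne, Bool.eq_iff_iff]
    simp only [List.nil_append, Nat.sub_zero, PySem.List.foldl_count_if, zero_add, beq_iff_eq,
      Nat.cast_inj, List.length_map, List.length_range', List.all_eq_true, List.mem_range]
    have hL : (List.map (fun j => String.ofList (rotF^[j] strng.toList))
        (List.range' 1 (Nat.find hex))).length = Nat.find hex := by simp
    constructor
    · intro hcount x hx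
      have hall := List.countP_eq_length.mp (by rw [hL]; exact hcount)
      have hres := (mem_rots_iff strng.toList hnil (Nat.find hex) hpspec.1 hpspec.2
          (fun s => arr.contains s = true)).mp
        (fun j h1 h2 => hall _ (List.mem_map_of_mem
          (List.mem_range'.mpr ⟨j - 1, by omega, by omega⟩))) x hx
      rwa [List.rotate_eq_drop_append_take (le_of_lt hx)] at hres
    · intro hB
      conv_rhs => rw [← hL]
      apply List.countP_eq_length.mpr
      intro a ha
      obtain ⟨j, hj, rfl⟩ := List.mem_map.mp ha
      obtain ⟨k, hk, rfl⟩ := List.mem_range'.mp hj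
      exact (mem_rots_iff strng.toList hnil (Nat.find hex) hpspec.1 hpspec.2
          (fun s => arr.contains s = true)).mpr
        (fun i hi => by
          have hres := hB i hi
          rwa [← List.rotate_eq_drop_append_take (le_of_lt hi)] at hres)
        (1 + 1 * k) (by omega) (by omega)
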